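-- pv_equiv track=rewrite | github.com/aciupan/MUSIC_RNN | polytrack/functions.py | dictionary_from_notes_chords
-- ===== SOURCE A (Python) =====
-- def dictionary_from_notes_chords(set_melody, set_chords):
--     list_melody = list(set_melody)
--     list_melody.sort()
--     list_chords = list(set_chords)
--     list_chords.sort()
--
--     dict_allchords  = {}
--     dict_melody     = {}
--     dict_chords     = {}
--     eventid         = 0
--     for melody_chord in list_melody:
--         eventid +=1
--         dict_allchords[eventid]     = melody_chord
--         dict_melody[melody_chord]   = eventid
--     for chord_chord in list_chords:
--         eventid +=1
--         dict_allchords[eventid]     = chord_chord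
--         dict_chords[chord_chord]    = eventid
--     return  dict_allchords, dict_melody, dict_chords
-- ===== SOURCE B (Python) =====
-- def dictionary_from_notes_chords(set_melody, set_chords):
--     # Tag every element with its source (0 = melody, 1 = chord), sort the single
--     # tagged union lexicographically (all melody items sort before all chord items),
--     # then one dispatch pass assigns consecutive event ids and routes each item
--     # into the right inverse map.
--     tagged = [(0, item) for item in set_melody] + [(1, item) for item in set_chords]
--     tagged.sort()
--     dict_allchords = {}
--     dict_melody = {}
--     dict_chords = {}
--     for eventid, (tag, item) in enumerate(tagged, start=1):
--         dict_allchords[eventid] = item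
--         if tag:
--             dict_chords[item] = eventid
--         else:
--             dict_melody[item] = eventid
--     return dict_allchords, dict_melody, dict_chords
-- ===== Notes on version B (the rewrite author's own statement) =====
-- stated objective: alternative
-- what changed: Instead of two separate sorts and two id-counting loops over three dicts, B tags each element with its source (0=melody, 1=chord), sorts the single tagged union lexicographically, and one dispatch pass over that sorted union assigns event ids and routes items into the correct inverse map.
import Mathlib
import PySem

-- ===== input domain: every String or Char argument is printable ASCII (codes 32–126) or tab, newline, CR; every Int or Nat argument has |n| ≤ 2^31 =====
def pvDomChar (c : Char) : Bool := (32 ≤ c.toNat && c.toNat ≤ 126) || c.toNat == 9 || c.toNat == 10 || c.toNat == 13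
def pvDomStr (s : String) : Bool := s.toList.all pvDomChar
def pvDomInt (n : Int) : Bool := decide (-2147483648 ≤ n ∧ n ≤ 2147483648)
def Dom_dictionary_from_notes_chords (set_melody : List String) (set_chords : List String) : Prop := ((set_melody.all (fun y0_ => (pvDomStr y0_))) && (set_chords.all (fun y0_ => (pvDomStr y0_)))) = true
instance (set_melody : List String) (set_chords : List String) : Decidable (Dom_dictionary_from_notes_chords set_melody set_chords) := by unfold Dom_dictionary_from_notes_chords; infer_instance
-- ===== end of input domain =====

-- B sorts a single source-tagged union ((0,melody item) / (1,chord item)) and dispatches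
-- one pass over it, instead of A's two separate sorts and two id-counting loops
-- (objective: alternative algorithm of the same cost).

-- ===== PORT A =====
def dictionary_from_notes_chords (set_melody : List String) (set_chords : List String) : (List (Int × String)) × (List (String × Int)) × (List (String × Int)) :=
  let list_melody := PySem.List.sorted set_melody (fun x => x) false
  let list_chords := PySem.List.sorted set_chords (fun x => x) false
  -- state: (eventid, dict_allchords, dict_melody or dict_chords)
  let s1 : Int × PySem.Dict Int String × PySem.Dict String Int :=
    list_melody.foldl
      (fun st melody_chord =>
        (st.1 + 1, st.2.1.insert (st.1 + 1) melody_chord, st.2.2.insert melody_chord (st.1 + 1)))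
      (0, PySem.Dict.empty, PySem.Dict.empty)
  let s2 : Int × PySem.Dict Int String × PySem.Dict String Int :=
    list_chords.foldl
      (fun st chord_chord =>
        (st.1 + 1, st.2.1.insert (st.1 + 1) chord_chord, st.2.2.insert chord_chord (st.1 + 1)))
      (s1.1, s1.2.1, PySem.Dict.empty)
  (s2.2.1.items, s1.2.2.items, s2.2.2.items)

-- ===== PORT B =====
def dictionary_from_notes_chords_alt (set_melody : List String) (set_chords : List String) : (List (Int × String)) × (List (String × Int)) × (List (String × Int)) :=
  let tagged : List (Int × String) :=
    set_melody.map (fun item => ((0 : Int), item)) ++ set_chords.map (fun item => ((1 : Int), item))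
  let taggedSorted := PySem.List.sorted2 tagged Prod.fst Prod.snd false
  -- state: (dict_allchords, dict_melody, dict_chords)
  let final : PySem.Dict Int String × PySem.Dict String Int × PySem.Dict String Int :=
    (PySem.List.enumerate taggedSorted 1).foldl
      (fun st p =>
        let all := st.1.insert p.1 p.2.2
        if p.2.1 ≠ 0 then (all, st.2.1, st.2.2.insert p.2.2 p.1)
        else (all, st.2.1.insert p.2.2 p.1, st.2.2))
      (PySem.Dict.empty, PySem.Dict.empty, PySem.Dict.empty)
  (final.1.items, final.2.1.items, final.2.2.items)

-- ===== PRECONDITION & SPEC =====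
def Spec_dictionary_from_notes_chords (set_melody : List String) (set_chords : List String) (out : (List (Int × String)) × (List (String × Int)) × (List (String × Int))) : Prop := out = dictionary_from_notes_chords_alt set_melody set_chords
instance (set_melody : List String) (set_chords : List String) (out : (List (Int × String)) × (List (String × Int)) × (List (String × Int))) : Decidable (Spec_dictionary_from_notes_chords set_melody set_chords out) := by unfold Spec_dictionary_from_notes_chords; infer_instance

-- ===== CLAIM (what is proved, stated in full; the proofs are below) =====
def Claim_equal_dictionary_from_notes_chords : Prop := ∀ (set_melody : List String) (set_chords : List String), Dom_dictionary_from_notes_chords set_melody set_chords → Spec_dictionary_from_notes_chords set_melody set_chords (dictionary_from_notes_chords set_melody set_chords)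

-- ===== LEMMAS AND PROOFS =====

/-- The lexicographic tuple comparator `sorted2 _ Prod.fst Prod.snd` uses. -/
def pvLt (a b : Int × String) : Bool :=
  decide (a.1 < b.1) || (!decide (b.1 < a.1) && decide (a.2 < b.2))

theorem pv_sorted2_eq (xs : List (Int × String)) :
    PySem.List.sorted2 xs Prod.fst Prod.snd false
      = xs.foldl (fun acc x => PySem.List.insertBy pvLt x acc) [] := rfl

/-- Inserting past a prefix the comparator never stops before. -/
theorem pv_insertBy_append (before : (Int × String) → (Int × String) → Bool)
    (M C : List (Int × String)) (x : Int × String)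
    (h : ∀ y ∈ M, before x y = false) :
    PySem.List.insertBy before x (M ++ C) = M ++ PySem.List.insertBy before x C := by
  induction M with
  | nil => simp
  | cons y ys ih =>
      simp only [List.cons_append, PySem.List.insertBy, h y (by simp)]
      simp [ih (fun z hz => h z (by simp [hz]))]

/-- Within one tag, `pvLt` is string comparison, so insertion commutes with tagging. -/
theorem pv_insertBy_map (t : Int) (x : String) (L : List String) :
    PySem.List.insertBy pvLt (t, x) (L.map (fun s => (t, s)))
      = (PySem.List.insertBy (fun a b => decide (a < b)) x L).map (fun s => (t, s)) := by
  induction L with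
  | nil => rfl
  | cons y ys ih =>
      simp only [List.map_cons, PySem.List.insertBy, pvLt, lt_irrefl, decide_false,
        Bool.false_or, Bool.not_false, Bool.true_and]
      by_cases hxy : x < y
      · simp [hxy]
      · simp [hxy, ih]

/-- Melody phase: folding tag-0 items into a tag-0 accumulator is the untagged sort fold. -/
theorem pv_fold_tag0 (L : List String) (acc : List String) :
    (L.map (fun s => ((0 : Int), s))).foldl (fun a x => PySem.List.insertBy pvLt x a)
        (acc.map (fun s => ((0 : Int), s)))
      = (L.foldl (fun a x => PySem.List.insertBy (fun p q => decide (p < q)) x a) acc).map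
          (fun s => ((0 : Int), s)) := by
  induction L generalizing acc with
  | nil => rfl
  | cons y ys ih =>
      simp only [List.map_cons, List.foldl_cons, pv_insertBy_map]
      exact ih _

/-- Chord phase: tag-1 items skip the tag-0 prefix and sort among themselves. -/
theorem pv_fold_tag1 (L : List String) (acc M₀ : List String) :
    (L.map (fun s => ((1 : Int), s))).foldl (fun a x => PySem.List.insertBy pvLt x a)
        (M₀.map (fun s => ((0 : Int), s)) ++ acc.map (fun s => ((1 : Int), s)))
      = M₀.map (fun s => ((0 : Int), s)) ++
          (L.foldl (fun a x => PySem.List.insertBy (fun p q => decide (p < q)) x a) acc).map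
            (fun s => ((1 : Int), s)) := by
  induction L generalizing acc with
  | nil => rfl
  | cons y ys ih =>
      simp only [List.map_cons, List.foldl_cons]
      rw [pv_insertBy_append pvLt _ _ _ (by
        intro z hz
        simp only [List.mem_map] at hz
        obtain ⟨s, _, rfl⟩ := hz
        simp [pvLt])]
      rw [pv_insertBy_map]
      exact ih _

/-- The sorted tagged union is the tagged sorted melody followed by the tagged sorted chords. -/
theorem pv_sorted_tagged (m c : List String) :
    PySem.List.sorted2
        (m.map (fun item => ((0 : Int), item)) ++ c.map (fun item => ((1 : Int), item)))
        Prod.fst Prod.snd false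
      = (PySem.List.sorted m (fun x => x) false).map (fun s => ((0 : Int), s)) ++
        (PySem.List.sorted c (fun x => x) false).map (fun s => ((1 : Int), s)) := by
  rw [pv_sorted2_eq, List.foldl_append]
  have h0 := pv_fold_tag0 m []
  simp only [List.map_nil] at h0
  rw [h0]
  have h1 := pv_fold_tag1 c []
      (m.foldl (fun a x => PySem.List.insertBy (fun p q => decide (p < q)) x a) [])
  simp only [List.map_nil, List.append_nil] at h1
  rw [h1, PySem.List.sorted_eq_foldl_insertBy, PySem.List.sorted_eq_foldl_insertBy]

/-- A's loop, started at eventid `n`, equals the enumerate-based folds started at index `n+1`. -/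
theorem pv_loop_eq (xs : List String) (n : Int) (da : PySem.Dict Int String) (dm : PySem.Dict String Int) :
    xs.foldl (fun st x => (st.1 + 1, st.2.1.insert (st.1 + 1) x, st.2.2.insert x (st.1 + 1))) (n, da, dm)
    = (n + xs.length,
       (PySem.List.enumerate xs (n + 1)).foldl (fun d p => d.insert p.1 p.2) da,
       (PySem.List.enumerate xs (n + 1)).foldl (fun d p => d.insert p.2 p.1) dm) := by
  induction xs generalizing n da dm with
  | nil => simp [PySem.List.enumerate_nil]
  | cons x xs ih =>
      simp only [List.foldl_cons, PySem.List.enumerate_cons, ih]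
      refine Prod.ext ?_ (Prod.ext ?_ ?_) <;> simp <;> ring_nf

/-- B's dispatch over the tag-0 block only touches the all-chords and melody dicts. -/
theorem pv_dispatch_tag0 (L : List String) (k : Int)
    (da : PySem.Dict Int String) (dm dc : PySem.Dict String Int) :
    (PySem.List.enumerate (L.map (fun s => ((0 : Int), s))) k).foldl
        (fun st p =>
          let all := st.1.insert p.1 p.2.2
          if p.2.1 ≠ 0 then (all, st.2.1, st.2.2.insert p.2.2 p.1)
          else (all, st.2.1.insert p.2.2 p.1, st.2.2))
        (da, dm, dc)
      = ((PySem.List.enumerate L k).foldl (fun d p => d.insert p.1 p.2) da,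
         (PySem.List.enumerate L k).foldl (fun d p => d.insert p.2 p.1) dm,
         dc) := by
  induction L generalizing k da dm with
  | nil => simp [PySem.List.enumerate_nil]
  | cons x xs ih =>
      simp only [List.map_cons, PySem.List.enumerate_cons, List.foldl_cons]
      simpa using ih (k + 1) _ _

/-- B's dispatch over the tag-1 block only touches the all-chords and chords dicts. -/
theorem pv_dispatch_tag1 (L : List String) (k : Int)
    (da : PySem.Dict Int String) (dm dc : PySem.Dict String Int) :
    (PySem.List.enumerate (L.map (fun s => ((1 : Int), s))) k).foldl
        (fun st p =>
          let all := st.1.insert p.1 p.2.2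
          if p.2.1 ≠ 0 then (all, st.2.1, st.2.2.insert p.2.2 p.1)
          else (all, st.2.1.insert p.2.2 p.1, st.2.2))
        (da, dm, dc)
      = ((PySem.List.enumerate L k).foldl (fun d p => d.insert p.1 p.2) da,
         dm,
         (PySem.List.enumerate L k).foldl (fun d p => d.insert p.2 p.1) dc) := by
  induction L generalizing k da dc with
  | nil => simp [PySem.List.enumerate_nil]
  | cons x xs ih =>
      simp only [List.map_cons, PySem.List.enumerate_cons, List.foldl_cons]
      simpa using ih (k + 1) _ _

theorem dictionary_eq (set_melody : List String) (set_chords : List String) :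
    dictionary_from_notes_chords set_melody set_chords = dictionary_from_notes_chords_alt set_melody set_chords := by
  unfold dictionary_from_notes_chords dictionary_from_notes_chords_alt
  simp only [pv_sorted_tagged, pv_loop_eq, PySem.List.enumerate_append, List.foldl_append,
    pv_dispatch_tag0, pv_dispatch_tag1, zero_add, List.length_map]
  rw [Int.add_comm 1 ((PySem.List.sorted set_melody (fun x => x) false).length : Int)]

-- ===== VERDICT (by name: the statement is the Claim_ definition above) =====
theorem dictionary_from_notes_chords_spec : Claim_equal_dictionary_from_notes_chords := by
  intro m c _
  unfold Spec_dictionary_from_notes_chords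
  exact dictionary_eq m c
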